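-- pv_equiv track=rewrite | github.com/defranchis/DirectMtLHC | old_code/mergeCovarianceConvino.py | makeMergedMap
-- ===== SOURCE A (Python) =====
-- def makeMergedMap(mergedlist,systlist):
--     merge = {}
--     actually_merged = []
--     for m in mergedlist:
--         l = []
--         for s in systlist:
--             if s.split('_')[0] == m:
--                 l.append(s)
--         merge[m] = l
--         if len(l)>1:
--             actually_merged.append(m)
--     return merge, actually_merged
-- ===== SOURCE B (Python) =====
-- def makeMergedMap(mergedlist, systlist):
--     # seed one empty bucket per merged name, route each systematic to its
--     # bucket in a single pass over systlist, then filter for actually merged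
--     merge = {m: [] for m in mergedlist}
--     for s in systlist:
--         p = s.split('_')[0]
--         if p in merge:
--             merge[p].append(s)
--     actually_merged = [m for m in mergedlist if len(merge[m]) > 1]
--     return merge, actually_merged
-- ===== Notes on version B (the rewrite author's own statement) =====
-- stated objective: faster
-- what changed: B seeds a dict with one empty bucket per merged name, routes each systematic to its bucket in a single pass over systlist, and derives actually_merged by a final filter, replacing A's rescan of systlist for every merged name.
import Mathlib
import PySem

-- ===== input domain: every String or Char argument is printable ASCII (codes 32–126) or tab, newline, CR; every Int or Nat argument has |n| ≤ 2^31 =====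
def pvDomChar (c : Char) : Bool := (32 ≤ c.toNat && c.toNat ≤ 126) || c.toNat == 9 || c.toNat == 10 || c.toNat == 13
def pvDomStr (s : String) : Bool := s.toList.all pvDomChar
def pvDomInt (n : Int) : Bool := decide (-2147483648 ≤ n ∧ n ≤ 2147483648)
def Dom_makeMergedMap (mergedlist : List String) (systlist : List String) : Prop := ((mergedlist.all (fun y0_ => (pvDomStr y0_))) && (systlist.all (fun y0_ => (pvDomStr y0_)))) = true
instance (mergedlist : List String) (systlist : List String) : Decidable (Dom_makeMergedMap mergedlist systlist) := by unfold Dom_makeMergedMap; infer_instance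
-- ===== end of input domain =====

-- B seeds one empty bucket per merged name, routes each systematic to its bucket in one pass over systlist,
-- and derives actually_merged by a final filter, instead of A's rescan of systlist per merged name.

-- s.split('_')[0]; the separator is nonempty so split? is some and never empty: the defaults are never used
def pvPrefix (s : String) : String := PySem.List.pyGetD ((PySem.Str.split? s "_").getD []) 0 ""

-- ===== PORT A =====
def makeMergedMap (mergedlist : List String) (systlist : List String) : (List (String × List String)) × List String :=
  let st := mergedlist.foldl (fun (st : PySem.Dict String (List String) × List String) m =>
    let l := systlist.foldl (fun l s => if pvPrefix s == m then l ++ [s] else l) []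
    let merge := st.1.insert m l
    let am := if l.length > 1 then st.2 ++ [m] else st.2
    (merge, am)) (PySem.Dict.empty, [])
  (st.1.items, st.2)

-- ===== PORT B =====
def makeMergedMap_alt (mergedlist : List String) (systlist : List String) : (List (String × List String)) × List String :=
  -- merge = {m: [] for m in mergedlist}
  let merge0 := mergedlist.foldl (fun d m => d.insert m ([] : List String)) PySem.Dict.empty
  -- for s in systlist: if p in merge: merge[p].append(s)
  let merge := systlist.foldl (fun d s =>
    let p := pvPrefix s
    if d.contains p then d.modify p [] (· ++ [s]) else d) merge0
  -- actually_merged = [m for m in mergedlist if len(merge[m]) > 1]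
  let actually_merged := mergedlist.filter (fun m => (merge.getD m []).length > 1)
  (merge.items, actually_merged)

-- ===== PRECONDITION & SPEC =====
def Spec_makeMergedMap (mergedlist : List String) (systlist : List String) (out : (List (String × List String)) × List String) : Prop := out = makeMergedMap_alt mergedlist systlist
instance (mergedlist : List String) (systlist : List String) (out : (List (String × List String)) × List String) : Decidable (Spec_makeMergedMap mergedlist systlist out) := by unfold Spec_makeMergedMap; infer_instance

-- ===== CLAIM (what is proved, stated in full; the proofs are below) =====
def Claim_equal_makeMergedMap : Prop := ∀ (mergedlist : List String) (systlist : List String), Dom_makeMergedMap mergedlist systlist → Spec_makeMergedMap mergedlist systlist (makeMergedMap mergedlist systlist)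

-- ===== LEMMAS AND PROOFS =====

-- A's inner loop over systlist, in filter form
def pvBucket (systlist : List String) (m : String) : List String :=
  systlist.filter (fun s => pvPrefix s == m)

-- getD after a foldl of inserts whose value depends only on the key
theorem pvGetD_foldl_insert (l : List String) (v : String → List String)
    (d : PySem.Dict String (List String)) (k : String) :
    (l.foldl (fun d m => d.insert m (v m)) d).getD k []
      = if k ∈ l then v k else d.getD k [] := by
  induction l generalizing d with
  | nil => simp
  | cons m rest ih =>
    simp only [List.foldl_cons, ih, PySem.Dict.getD_insert, List.mem_cons]
    by_cases hk : k ∈ rest <;> by_cases he : k = m <;> simp [hk, he]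

-- the routing pass preserves the key set
theorem pvFill_keys (l : List String) (d : PySem.Dict String (List String)) :
    (l.foldl (fun d s => if d.contains (pvPrefix s) then d.modify (pvPrefix s) [] (· ++ [s]) else d) d).keys
      = d.keys := by
  induction l generalizing d with
  | nil => rfl
  | cons s rest ih =>
    simp only [List.foldl_cons]
    by_cases hc : d.contains (pvPrefix s) = true
    · rw [if_pos hc, ih, PySem.Dict.keys_modify]
      rw [PySem.Dict.keys_insert_of_contains _ _ hc]
    · rw [if_neg hc, ih]

-- the routing pass appends exactly A's bucket to every present key
theorem pvFill_getD (l : List String) (d : PySem.Dict String (List String)) (k : String) :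
    (l.foldl (fun d s => if d.contains (pvPrefix s) then d.modify (pvPrefix s) [] (· ++ [s]) else d) d).getD k []
      = d.getD k [] ++ (if d.contains k then pvBucket l k else []) := by
  induction l generalizing d with
  | nil => simp [pvBucket]
  | cons s rest ih =>
    simp only [List.foldl_cons]
    by_cases hc : d.contains (pvPrefix s) = true
    · rw [if_pos hc, ih, PySem.Dict.contains_modify, PySem.Dict.getD_modify]
      by_cases he : k = pvPrefix s
      · have hb : (pvPrefix s == k) = true := by simp [he]
        have hb' : (k == pvPrefix s) = true := by simp [he]
        rw [if_pos he, he] at *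
        simp only [pvBucket, List.filter_cons, hb, if_true, Bool.true_or, hc,
          List.append_assoc, List.singleton_append]
      · have hb : (pvPrefix s == k) = false := by
          simp only [beq_eq_false_iff_ne, ne_eq]
          exact fun h => he h.symm
        have hb' : (k == pvPrefix s) = false := by simpa using he
        rw [if_neg he]
        simp only [pvBucket, List.filter_cons, hb, Bool.false_eq_true, if_false, hb',
          Bool.false_or]
    · rw [if_neg hc, ih]
      by_cases hck : d.contains k = true
      · have hb : (pvPrefix s == k) = false := by
          simp only [beq_eq_false_iff_ne, ne_eq]
          intro h
          rw [h] at hc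
          exact hc hck
        simp only [hck, if_true, pvBucket, List.filter_cons, hb, Bool.false_eq_true, if_false]
      · simp [hck]

-- ===== VERDICT (by name: the statement is the Claim_ definition above) =====
theorem makeMergedMap_spec : Claim_equal_makeMergedMap := by
  intro mergedlist systlist _
  unfold Spec_makeMergedMap makeMergedMap makeMergedMap_alt
  -- split A's paired accumulator into the dict fold and the actually_merged fold
  rw [PySem.List.foldl_prod_mk
    (f := fun (d : PySem.Dict String (List String)) m => d.insert m (systlist.foldl (fun l s => if pvPrefix s == m then l ++ [s] else l) []))
    (g := fun (am : List String) m => if (systlist.foldl (fun l s => if pvPrefix s == m then l ++ [s] else l) []).length > 1 then am ++ [m] else am)]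
  -- name the two dicts
  set dA := mergedlist.foldl (fun (d : PySem.Dict String (List String)) m =>
    d.insert m (systlist.foldl (fun l s => if pvPrefix s == m then l ++ [s] else l) [])) PySem.Dict.empty with hdA
  set merge0 := mergedlist.foldl (fun (d : PySem.Dict String (List String)) m => d.insert m ([] : List String)) PySem.Dict.empty with hm0
  set dB := systlist.foldl (fun d s =>
    let p := pvPrefix s
    if d.contains p then d.modify p [] (· ++ [s]) else d) merge0 with hdB
  -- A's inner loop is the bucket
  have hbuck : ∀ m, systlist.foldl (fun l s => if pvPrefix s == m then l ++ [s] else l) [] = pvBucket systlist m := by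
    intro m
    rw [PySem.List.foldl_append_if_eq_filter]
    rfl
  -- keys
  have hk0 : merge0.keys = PySem.Set.ofList mergedlist := by
    rw [hm0, PySem.Dict.keys_foldl_insert]
    simp [PySem.Dict.keys_empty, PySem.Set.update_nil_left]
  have hkA : dA.keys = PySem.Set.ofList mergedlist := by
    rw [hdA, PySem.Dict.keys_foldl_insert]
    simp [PySem.Dict.keys_empty, PySem.Set.update_nil_left]
  have hkB : dB.keys = PySem.Set.ofList mergedlist := by
    rw [hdB, pvFill_keys, hk0]
  -- merge0 lookups
  have hc0 : ∀ k, merge0.contains k = decide (k ∈ mergedlist) := by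
    intro k
    rw [PySem.Dict.contains_eq_decide_mem_keys, hk0]
    simp [PySem.Set.mem_ofList]
  have hg0 : ∀ k, merge0.getD k [] = [] := by
    intro k
    rw [hm0, pvGetD_foldl_insert]
    split <;> simp [PySem.Dict.getD_empty]
  -- getD agreement on members of mergedlist
  have hgetB : ∀ k, k ∈ mergedlist → dB.getD k [] = pvBucket systlist k := by
    intro k hk
    rw [hdB, pvFill_getD, hg0, hc0]
    simp [hk]
  have hgetA : ∀ k, k ∈ mergedlist → dA.getD k [] = pvBucket systlist k := by
    intro k hk
    rw [hdA, pvGetD_foldl_insert, if_pos hk, hbuck]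
  have hget : ∀ k, k ∈ mergedlist → dB.getD k [] = dA.getD k [] := by
    intro k hk
    rw [hgetB k hk, hgetA k hk]
  -- the two dicts are equal
  have hdicts : dA = dB := by
    apply PySem.Dict.ext
    rw [PySem.Dict.items_eq_map_keys dA (by rw [hkA]; exact PySem.Set.nodup_ofList _) [],
        PySem.Dict.items_eq_map_keys dB (by rw [hkB]; exact PySem.Set.nodup_ofList _) [],
        hkA, hkB]
    apply List.map_congr_left
    intro k hk
    rw [hget k ((PySem.Set.mem_ofList _ _).mp hk)]
  -- the actually_merged lists are equal
  have ham : mergedlist.foldl (fun am m =>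
        if (systlist.foldl (fun l s => if pvPrefix s == m then l ++ [s] else l) []).length > 1 then am ++ [m] else am) []
      = mergedlist.filter (fun m => (dB.getD m []).length > 1) := by
    rw [PySem.List.foldl_append_ite_eq_filter]
    simp only [List.nil_append]
    apply List.filter_congr
    intro m hm
    rw [hgetB m hm, hbuck]
  simp only [Prod.mk.injEq]
  exact ⟨by rw [hdicts], ham⟩
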